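-- pv_equiv track=rewrite | github.com/Nana7mi-swjtu/agent | app/agent/graph/nodes.py | _analysis_module_question
-- ===== SOURCE A (Python) =====
-- from typing import Any
--
-- def _analysis_module_question(missing_fields: list[dict[str, Any]]) -> str:
--     grouped: dict[str, list[str]] = {}
--     names: dict[str, str] = {}
--     for item in missing_fields:
--         module_id = str(item.get("moduleId", "")).strip()
--         label = str(item.get("label", "")).strip()
--         module_name = str(item.get("moduleName", module_id)).strip() or module_id
--         if not module_id or not label:
--             continue
--         grouped.setdefault(module_id, [])
--         if label not in grouped[module_id]:
--             grouped[module_id].append(label)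
--         names[module_id] = module_name
--     parts = [f"{names[module_id]}：{'、'.join(labels)}" for module_id, labels in grouped.items() if labels]
--     return "共享信息已收到，请继续补充模块信息：" + "；".join(parts) + "。"
-- ===== SOURCE B (Python) =====
-- def _analysis_module_question(missing_fields):
--     # Normalise once into (module_id, label, name) triples, keep only valid ones.
--     valid = []
--     for item in missing_fields:
--         module_id = str(item.get("moduleId", "")).strip()
--         label = str(item.get("label", "")).strip()
--         module_name = str(item.get("moduleName", module_id)).strip() or module_id
--         if module_id and label:
--             valid.append((module_id, label, module_name))
--     # Per-module data is recomputed by scanning `valid`, not accumulated in dicts.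
--     parts = []
--     for mid in dict.fromkeys(m for m, _, _ in valid):
--         labels = dict.fromkeys(l for m, l, _ in valid if m == mid)
--         name = [n for m, _, n in valid if m == mid][-1]
--         parts.append(f"{name}：{'、'.join(labels)}")
--     return "共享信息已收到，请继续补充模块信息：" + "；".join(parts) + "。"
-- ===== Notes on version B (the rewrite author's own statement) =====
-- stated objective: alternative
-- what changed: B keeps no grouping dicts at all: it first normalises the input into a flat list of valid (module_id,label,name) triples, then derives the module order, each module's deduped labels and its last name by separate scans/comprehensions over that list (group-by-rescan instead of incremental dict accumulation).
import Mathlib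
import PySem

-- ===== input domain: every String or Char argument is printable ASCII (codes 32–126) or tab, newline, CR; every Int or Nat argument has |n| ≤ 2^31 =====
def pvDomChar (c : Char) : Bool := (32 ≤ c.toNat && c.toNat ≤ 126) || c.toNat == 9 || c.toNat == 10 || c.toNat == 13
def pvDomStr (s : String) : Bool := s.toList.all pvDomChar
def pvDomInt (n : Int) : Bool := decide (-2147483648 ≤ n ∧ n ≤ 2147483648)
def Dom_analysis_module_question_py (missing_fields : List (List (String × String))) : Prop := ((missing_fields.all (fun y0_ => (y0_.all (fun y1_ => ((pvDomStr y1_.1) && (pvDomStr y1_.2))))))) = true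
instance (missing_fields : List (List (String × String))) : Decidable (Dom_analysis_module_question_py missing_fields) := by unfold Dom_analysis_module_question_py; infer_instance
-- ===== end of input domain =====

-- ===== PORT A =====
-- B drops the grouping dicts: it normalises into valid triples first and rebuilds each module's
-- labels/name by rescans of that flat list; return-value equivalence only.
-- item.get(k, d): first-match lookup on the association list (Python's dict.get; exact when keys are unique, as in a real dict)
def pvItemGet (item : List (String × String)) (k dflt : String) : String :=
  ((PySem.Dict.mk item).get? k).getD dflt

def pvStepA (s : PySem.Dict String (List String) × PySem.Dict String String)
    (item : List (String × String)) :
    PySem.Dict String (List String) × PySem.Dict String String :=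
  let module_id := PySem.Str.strip (pvItemGet item "moduleId" "")
  let label := PySem.Str.strip (pvItemGet item "label" "")
  let module_name0 := PySem.Str.strip (pvItemGet item "moduleName" module_id)
  let module_name := if module_name0 = "" then module_id else module_name0
  if module_id = "" ∨ label = "" then s
  else
    -- setdefault + in-place append: absent key lands at the end, present key keeps its slot (= Dict.insert)
    let cur := s.1.getD module_id []
    (s.1.insert module_id (if label ∈ cur then cur else cur ++ [label]),
     s.2.insert module_id module_name)

def analysis_module_question_py (missing_fields : List (List (String × String))) : String :=
  let st := missing_fields.foldl pvStepA (PySem.Dict.empty, PySem.Dict.empty)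
  -- names[module_id]: the key is always present when reached (inserted together with the group); default "" is dead
  let parts := (st.1.items.filter (fun p => !p.2.isEmpty)).map
    (fun p => ((st.2.get? p.1).getD "") ++ "：" ++ PySem.Str.join "、" p.2)
  "共享信息已收到，请继续补充模块信息：" ++ PySem.Str.join "；" parts ++ "。"

-- ===== PORT B =====
def pvTriB (item : List (String × String)) : String × String × String :=
  let module_id := PySem.Str.strip (pvItemGet item "moduleId" "")
  let label := PySem.Str.strip (pvItemGet item "label" "")
  let module_name0 := PySem.Str.strip (pvItemGet item "moduleName" module_id)
  (module_id, label, if module_name0 = "" then module_id else module_name0)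

def analysis_module_question_py_alt (missing_fields : List (List (String × String))) : String :=
  let valid := missing_fields.foldl
    (fun acc item =>
      let t := pvTriB item
      if t.1 = "" ∨ t.2.1 = "" then acc else acc ++ [t]) []
  -- dict.fromkeys = first-occurrence dedup (PySem.List.dedup)
  let parts := (PySem.List.dedup (valid.map (fun t => t.1))).map (fun mid =>
    let labels := PySem.List.dedup ((valid.filter (fun t => t.1 == mid)).map (fun t => t.2.1))
    -- [-1]: the scanned list is nonempty for every mid drawn from valid, so the default is dead
    let name := PySem.List.pyGetD ((valid.filter (fun t => t.1 == mid)).map (fun t => t.2.2)) (-1) ""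
    name ++ "：" ++ PySem.Str.join "、" labels)
  "共享信息已收到，请继续补充模块信息：" ++ PySem.Str.join "；" parts ++ "。"

-- ===== PRECONDITION & SPEC =====
def Spec_analysis_module_question_py (missing_fields : List (List (String × String))) (out : String) : Prop := out = analysis_module_question_py_alt missing_fields
instance (missing_fields : List (List (String × String))) (out : String) : Decidable (Spec_analysis_module_question_py missing_fields out) := by unfold Spec_analysis_module_question_py; infer_instance

-- ===== CLAIM (what is proved, stated in full; the proofs are below) =====
def Claim_equal_analysis_module_question_py : Prop := ∀ (missing_fields : List (List (String × String))), Dom_analysis_module_question_py missing_fields → Spec_analysis_module_question_py missing_fields (analysis_module_question_py missing_fields)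

-- ===== LEMMAS AND PROOFS =====

-- the list of valid triples, B's first pass as a filter/map
def pvValid (mf : List (List (String × String))) : List (String × String × String) :=
  (mf.map pvTriB).filter (fun t => !(t.1 == "" || t.2.1 == ""))

lemma pv_foldB_eq (mf : List (List (String × String))) (acc : List (String × String × String)) :
    mf.foldl (fun acc item =>
      let t := pvTriB item
      if t.1 = "" ∨ t.2.1 = "" then acc else acc ++ [t]) acc = acc ++ pvValid mf := by
  induction mf generalizing acc with
  | nil => simp [pvValid]
  | cons item rest ih =>
    simp only [List.foldl_cons, pvValid, List.map_cons, List.filter_cons]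
    by_cases h : (pvTriB item).1 = "" ∨ (pvTriB item).2.1 = ""
    · rw [if_pos h, ih]
      have hb : (!((pvTriB item).1 == "" || (pvTriB item).2.1 == "")) = false := by
        simp only [Bool.not_eq_false', Bool.or_eq_true, beq_iff_eq]; exact h
      rw [hb]; rfl
    · rw [if_neg h, ih]
      have hb : (!((pvTriB item).1 == "" || (pvTriB item).2.1 == "")) = true := by
        simp only [Bool.not_eq_true', Bool.or_eq_false_iff, beq_eq_false_iff_ne]
        exact ⟨fun h1 => h (Or.inl h1), fun h2 => h (Or.inr h2)⟩
      rw [hb]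
      simp [pvValid]

lemma pvStepA_def (g : PySem.Dict String (List String)) (nm : PySem.Dict String String)
    (item : List (String × String)) :
    pvStepA (g, nm) item =
      if (pvTriB item).1 = "" ∨ (pvTriB item).2.1 = "" then (g, nm)
      else (g.insert (pvTriB item).1
              (if (pvTriB item).2.1 ∈ g.getD (pvTriB item).1 [] then g.getD (pvTriB item).1 []
               else g.getD (pvTriB item).1 [] ++ [(pvTriB item).2.1]),
            nm.insert (pvTriB item).1 (pvTriB item).2.2) := rfl

lemma pv_dedup_snoc {α : Type} [DecidableEq α] (xs : List α) (l : α) :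
    PySem.List.dedup (xs ++ [l]) = if l ∈ xs then PySem.List.dedup xs else PySem.List.dedup xs ++ [l] := by
  simp only [PySem.List.dedup_eq_ofList, PySem.Set.ofList_append, PySem.Set.update_cons,
    PySem.Set.update_nil]
  simp [PySem.Set.add, PySem.Set.mem_ofList]

lemma pv_dedup_ne_nil {α : Type} [DecidableEq α] (xs : List α) (h : xs ≠ []) :
    PySem.List.dedup xs ≠ [] := by
  cases xs with
  | nil => exact absurd rfl h
  | cons x t =>
    intro hd
    have hx := (PySem.List.mem_dedup (x :: t) x).2 (by simp)
    rw [hd] at hx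
    simp at hx

-- the grouped items / names dicts A's loop builds, characterised over the valid triples
def pvGItems (vs : List (String × String × String)) : List (String × List String) :=
  (PySem.List.dedup (vs.map (fun t => t.1))).map
    (fun m => (m, PySem.List.dedup ((vs.filter (fun t => t.1 == m)).map (fun t => t.2.1))))

lemma pv_filter_ne_nil (vs : List (String × String × String)) (m : String)
    (hm : m ∈ vs.map (fun t => t.1)) : vs.filter (fun t => t.1 == m) ≠ [] := by
  obtain ⟨t, ht, hteq⟩ := List.mem_map.1 hm
  intro h
  have := List.filter_eq_nil_iff.1 h t ht
  simp [hteq] at this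

lemma pv_keys_of_items (g : PySem.Dict String (List String)) (vs : List (String × String × String))
    (hG : g.items = pvGItems vs) : g.keys = PySem.List.dedup (vs.map (fun t => t.1)) := by
  simp only [PySem.Dict.keys, hG, pvGItems, List.map_map]
  generalize PySem.List.dedup (vs.map (fun t => t.1)) = ms
  induction ms with
  | nil => rfl
  | cons a t ih =>
    rw [List.map_cons, ih]
    exact rfl

lemma pv_invariant (mf : List (List (String × String))) :
    (mf.foldl pvStepA (PySem.Dict.empty, PySem.Dict.empty)).1.items = pvGItems (pvValid mf) ∧
    ∀ k, (mf.foldl pvStepA (PySem.Dict.empty, PySem.Dict.empty)).2.get? k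
      = (((pvValid mf).filter (fun t => t.1 == k)).map (fun t => t.2.2)).getLast? := by
  induction mf using List.reverseRecOn with
  | nil =>
    constructor
    · simp [pvValid, pvGItems, PySem.Dict.empty]
    · intro k; simp [pvValid, PySem.Dict.get?_empty]
  | append_singleton mf item ih =>
    obtain ⟨hG, hN⟩ := ih
    rw [List.foldl_append, List.foldl_cons, List.foldl_nil]
    rcases hst : mf.foldl pvStepA (PySem.Dict.empty, PySem.Dict.empty) with ⟨g, nm⟩
    rw [hst] at hG hN
    simp only at hG hN
    have hvapp : pvValid (mf ++ [item]) = pvValid mf ++ pvValid [item] := by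
      simp [pvValid]
    rw [pvStepA_def]
    by_cases hv : (pvTriB item).1 = "" ∨ (pvTriB item).2.1 = ""
    · have hvs : pvValid (mf ++ [item]) = pvValid mf := by
        rw [hvapp]
        have : pvValid [item] = [] := by
          simp only [pvValid, List.map_cons, List.map_nil, List.filter]
          have hb : (!((pvTriB item).1 == "" || (pvTriB item).2.1 == "")) = false := by
            simp only [Bool.not_eq_false', Bool.or_eq_true, beq_iff_eq]; exact hv
          rw [hb]
        rw [this, List.append_nil]
      rw [if_pos hv, hvs]
      exact ⟨hG, hN⟩
    · have hvs : pvValid (mf ++ [item]) = pvValid mf ++ [pvTriB item] := by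
        rw [hvapp]
        have : pvValid [item] = [pvTriB item] := by
          simp only [pvValid, List.map_cons, List.map_nil, List.filter]
          have hb : (!((pvTriB item).1 == "" || (pvTriB item).2.1 == "")) = true := by
            simp only [Bool.not_eq_true', Bool.or_eq_false_iff, beq_eq_false_iff_ne]
            exact ⟨fun h1 => hv (Or.inl h1), fun h2 => hv (Or.inr h2)⟩
          rw [hb]
        rw [this]
      rcases htri : pvTriB item with ⟨m, l, n⟩
      rw [htri] at hvs hv
      rw [if_neg hv, hvs]
      set vs := pvValid mf with hvsdef
      have hkeys : g.keys = PySem.List.dedup (vs.map (fun t => t.1)) := pv_keys_of_items g vs hG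
      have hnd : g.keys.Nodup := by
        rw [hkeys, PySem.List.dedup_eq_ofList]; exact PySem.Set.nodup_ofList _
      constructor
      · -- grouped items
        simp only [pvGItems, List.map_append, List.filter_append, List.map_cons, List.map_nil,
          List.filter_cons, List.filter_nil]
        by_cases hmem : m ∈ vs.map (fun t => t.1)
        · -- existing module
          have hc : g.contains m = true := by
            rw [PySem.Dict.contains_eq_decide_mem_keys, hkeys]
            simp [hmem]
          have hmemit : (m, PySem.List.dedup ((vs.filter (fun t => t.1 == m)).map (fun t => t.2.1))) ∈ g.items := by
            rw [hG, pvGItems]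
            exact List.mem_map.2 ⟨m, by simp [hmem], rfl⟩
          have hcur : g.getD m [] = PySem.List.dedup ((vs.filter (fun t => t.1 == m)).map (fun t => t.2.1)) :=
            PySem.Dict.getD_of_mem_items g hmemit hnd []
          have hmids : PySem.List.dedup (vs.map (fun t => t.1) ++ [m]) = PySem.List.dedup (vs.map (fun t => t.1)) := by
            rw [pv_dedup_snoc, if_pos hmem]
          rw [PySem.Dict.items_insert_of_contains g _ hc, hG, hmids]
          simp only [pvGItems, List.map_map]
          apply List.map_congr_left
          intro k hk
          by_cases hkm : k = m
          · subst hkm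
            simp only [Function.comp, beq_self_eq_true, if_true, List.map_cons, List.map_nil]
            rw [hcur, pv_dedup_snoc]
            by_cases hlm : l ∈ (vs.filter (fun t => t.1 == k)).map (fun t => t.2.1)
            · rw [if_pos ((PySem.List.mem_dedup _ _).2 hlm), if_pos hlm]
            · rw [if_neg (fun h => hlm ((PySem.List.mem_dedup _ _).1 h)), if_neg hlm]
          · have hbk : (k == m) = false := beq_eq_false_iff_ne.2 hkm
            have hbm : (m == k) = false := beq_eq_false_iff_ne.2 (Ne.symm hkm)
            simp [Function.comp, hbk, hbm]
        · -- new module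
          have hc : g.contains m = false := by
            rw [PySem.Dict.contains_eq_decide_mem_keys, hkeys]
            simp [hmem]
          have hcur : g.getD m [] = [] := PySem.Dict.getD_of_not_contains g [] hc
          have hmids : PySem.List.dedup (vs.map (fun t => t.1) ++ [m])
              = PySem.List.dedup (vs.map (fun t => t.1)) ++ [m] := by
            rw [pv_dedup_snoc, if_neg hmem]
          rw [PySem.Dict.items_insert_of_not_contains g _ hc, hG, hcur, hmids, List.map_append]
          have hfil : vs.filter (fun t => t.1 == m) = [] :=
            List.filter_eq_nil_iff.2 (fun t ht hbt => hmem
              (List.mem_map.2 ⟨t, ht, by simpa using hbt⟩))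
          congr 1
          · simp only [pvGItems]
            apply List.map_congr_left
            intro k hk
            have hkmem : k ∈ vs.map (fun t => t.1) := (PySem.List.mem_dedup _ _).1 hk
            have hkm : k ≠ m := fun h => hmem (h ▸ hkmem)
            have hbm : (m == k) = false := beq_eq_false_iff_ne.2 (Ne.symm hkm)
            simp [hbm]
          · simp [hfil, PySem.Set.ofList, PySem.Set.add]
      · -- names
        intro k
        simp only [List.filter_append, List.map_append, List.filter_cons, List.filter_nil]
        rw [PySem.Dict.get?_insert]
        by_cases hkm : k = m
        · subst hkm
          simp
        · have hbm : (m == k) = false := beq_eq_false_iff_ne.2 (Ne.symm hkm)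
          simp [hbm, hN k, hkm]

lemma pv_parts_final (mf : List (List (String × String))) :
    ((pvGItems (pvValid mf)).filter (fun p => !p.2.isEmpty)).map
        (fun p => (((((pvValid mf).filter (fun t => t.1 == p.1)).map (fun t => t.2.2)).getLast?).getD "")
          ++ "：" ++ PySem.Str.join "、" p.2)
      = (PySem.List.dedup ((pvValid mf).map (fun t => t.1))).map (fun mid =>
          (PySem.List.pyGetD (((pvValid mf).filter (fun t => t.1 == mid)).map (fun t => t.2.2)) (-1) "")
          ++ "：" ++ PySem.Str.join "、" (PySem.List.dedup (((pvValid mf).filter (fun t => t.1 == mid)).map (fun t => t.2.1)))) := by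
  set vs := pvValid mf with hvs
  have hfil_ne : ∀ mm, mm ∈ PySem.List.dedup (vs.map (fun t => t.1)) → vs.filter (fun t => t.1 == mm) ≠ [] :=
    fun mm hmm => pv_filter_ne_nil vs mm ((PySem.List.mem_dedup _ _).1 hmm)
  have hfilter : (pvGItems vs).filter (fun p => !p.2.isEmpty) = pvGItems vs := by
    rw [List.filter_eq_self]
    intro p hp
    obtain ⟨mm, hmm, hpe⟩ := List.mem_map.1 hp
    have h1 : (vs.filter (fun t => t.1 == mm)).map (fun t => t.2.1) ≠ [] := by
      rw [ne_eq, List.map_eq_nil_iff]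
      exact hfil_ne mm hmm
    have h2 := pv_dedup_ne_nil _ h1
    rw [← hpe]
    simpa using h2
  rw [hfilter, pvGItems, List.map_map]
  apply List.map_congr_left
  intro mid hmid
  have hne : (vs.filter (fun t => t.1 == mid)).map (fun t => t.2.2) ≠ [] := by
    rw [ne_eq, List.map_eq_nil_iff]
    exact hfil_ne mid hmid
  have h3 := PySem.List.pyGetD_neg_one ((vs.filter (fun t => t.1 == mid)).map (fun t => t.2.2)) "" hne
  simp only [Function.comp]
  rw [h3, List.getLast?_eq_some_getLast hne, Option.getD_some]

-- ===== VERDICT (by name: the statement is the Claim_ definition above) =====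
theorem analysis_module_question_py_spec : Claim_equal_analysis_module_question_py := by
  intro mf _
  show analysis_module_question_py mf = analysis_module_question_py_alt mf
  obtain ⟨hG, hN⟩ := pv_invariant mf
  simp only [analysis_module_question_py, analysis_module_question_py_alt, pv_foldB_eq,
    List.nil_append, hG, hN]
  rw [pv_parts_final mf]
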